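-- pv_equiv track=rewrite | github.com/Powersort-Competition/PowersortCompetitionExamples | helper/Inputs.py | timsort_drag_run_lengths
-- ===== SOURCE A (Python) =====
-- def timsort_drag_run_lengths(n):
--     if n <= 3:
--         return [n]
--     else:
--         nPrime = n // 2
--         nPrimePrime = n - nPrime - (nPrime - 1)
--         return timsort_drag_run_lengths(nPrime) + timsort_drag_run_lengths(nPrime - 1) + [
--             nPrimePrime]
-- ===== SOURCE B (Python) =====
-- def timsort_drag_run_lengths(n):
--     result = []
--     stack = [(True, n)]
--     while stack:
--         expand, x = stack.pop()
--         if not expand or x <= 3: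
--             result.append(x)
--         else:
--             a = x // 2
--             c = x - a - (a - 1)
--             stack.append((False, c))
--             stack.append((True, a - 1))
--             stack.append((True, a))
--     return result
-- ===== Notes on version B (the rewrite author's own statement) =====
-- stated objective: alternative
-- what changed: Replaces the self-recursive three-way concatenation with an explicit work-stack loop that appends run lengths left-to-right into one accumulator (no recursion, no list concatenation).
import Mathlib
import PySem

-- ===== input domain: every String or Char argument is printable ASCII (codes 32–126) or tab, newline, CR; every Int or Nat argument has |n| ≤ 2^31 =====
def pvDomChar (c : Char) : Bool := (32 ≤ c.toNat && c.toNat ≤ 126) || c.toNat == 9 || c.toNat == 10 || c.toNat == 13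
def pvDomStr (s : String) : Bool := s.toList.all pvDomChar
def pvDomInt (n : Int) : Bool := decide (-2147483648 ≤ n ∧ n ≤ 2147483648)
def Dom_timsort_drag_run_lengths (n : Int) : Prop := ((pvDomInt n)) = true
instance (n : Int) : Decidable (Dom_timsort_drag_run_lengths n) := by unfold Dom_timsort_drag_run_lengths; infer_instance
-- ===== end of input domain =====

-- B replaces A's self-recursion and list concatenations with an explicit work-stack loop
-- appending into one accumulator (alternative decomposition; same asymptotic cost).


-- ===== PORT A =====
def timsort_drag_run_lengths (n : Int) : List Int :=
  if n ≤ 3 then [n]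
  else
    let nPrime := PySem.Int.floordiv n 2
    let nPrimePrime := n - nPrime - (nPrime - 1)
    timsort_drag_run_lengths nPrime ++ timsort_drag_run_lengths (nPrime - 1) ++ [nPrimePrime]
termination_by n.toNat
decreasing_by
  · rw [PySem.Int.floordiv_eq_ediv_of_pos (by omega)]; omega
  · rw [PySem.Int.floordiv_eq_ediv_of_pos (by omega)]; omega

-- ===== PORT B =====
-- weight used only as the termination measure of the stack loop
def dragWeight (x : Int) : Nat :=
  if x ≤ 3 then 1
  else dragWeight (PySem.Int.floordiv x 2) + dragWeight (PySem.Int.floordiv x 2 - 1) + 1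
termination_by x.toNat
decreasing_by
  · rw [PySem.Int.floordiv_eq_ediv_of_pos (by omega)]; omega
  · rw [PySem.Int.floordiv_eq_ediv_of_pos (by omega)]; omega

theorem dragWeight_pos (x : Int) : 1 ≤ dragWeight x := by
  rw [dragWeight]; split
  · omega
  · omega

def dragItemWeight : Bool × Int → Nat
  | (true, x) => 2 * dragWeight x
  | (false, _) => 1

-- the while loop of Source B; the stack's head is the top (Python's list end)
def dragLoop (stack : List (Bool × Int)) (result : List Int) : List Int :=
  match stack with
  | [] => result
  | (expand, x) :: rest =>
    if !expand || x ≤ 3 then dragLoop rest (result ++ [x])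
    else
      let a := PySem.Int.floordiv x 2
      let c := x - a - (a - 1)
      dragLoop ((true, a) :: (true, a - 1) :: (false, c) :: rest) result
termination_by (stack.map dragItemWeight).sum
decreasing_by
  · have h1 : 1 ≤ dragItemWeight (expand, x) := by
      cases expand <;> simp [dragItemWeight] <;> exact le_trans (dragWeight_pos x) (by omega)
    simp only [List.map_cons, List.sum_cons]
    omega
  · have hexp : expand = true := by simp_all
    subst hexp
    simp only [List.map_cons, List.sum_cons, dragItemWeight]
    have hx : ¬ x ≤ 3 := by simp_all
    have hw : dragWeight x = dragWeight (PySem.Int.floordiv x 2) + dragWeight (PySem.Int.floordiv x 2 - 1) + 1 := by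
      rw [dragWeight]; simp [hx]
    omega

def timsort_drag_run_lengths_alt (n : Int) : List Int := dragLoop [(true, n)] []

-- ===== PRECONDITION & SPEC =====
def Spec_timsort_drag_run_lengths (n : Int) (out : List Int) : Prop := out = timsort_drag_run_lengths_alt n
instance (n : Int) (out : List Int) : Decidable (Spec_timsort_drag_run_lengths n out) := by unfold Spec_timsort_drag_run_lengths; infer_instance

-- ===== CLAIM (what is proved, stated in full; the proofs are below) =====
def Claim_equal_timsort_drag_run_lengths : Prop := ∀ (n : Int), Dom_timsort_drag_run_lengths n → Spec_timsort_drag_run_lengths n (timsort_drag_run_lengths n)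

-- ===== LEMMAS AND PROOFS =====

-- meaning of one stack item in terms of A's recursion
def dragItemOut : Bool × Int → List Int
  | (true, x) => timsort_drag_run_lengths x
  | (false, v) => [v]

theorem dragLoop_eq (stack : List (Bool × Int)) (result : List Int) :
    dragLoop stack result = result ++ stack.flatMap dragItemOut := by
  fun_induction dragLoop stack result with
  | case1 result => simp
  | case2 result expand x rest h ih =>
    rw [ih]
    cases expand with
    | false => simp [dragItemOut]
    | true =>
      simp only [Bool.not_true, Bool.false_or, decide_eq_true_eq] at h
      simp only [List.flatMap_cons, dragItemOut, List.append_assoc]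
      rw [timsort_drag_run_lengths]
      simp [h]
  | case3 result expand x rest h a c ih =>
    rw [ih]
    have hexp : expand = true := by cases expand <;> simp_all
    subst hexp
    simp only [Bool.not_true, Bool.false_or, decide_eq_true_eq] at h
    simp only [List.flatMap_cons, dragItemOut]
    rw [show timsort_drag_run_lengths x = timsort_drag_run_lengths (PySem.Int.floordiv x 2) ++ timsort_drag_run_lengths (PySem.Int.floordiv x 2 - 1) ++ [x - PySem.Int.floordiv x 2 - (PySem.Int.floordiv x 2 - 1)] from by rw [timsort_drag_run_lengths]; simp [h]]
    simp [a, c]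

-- ===== VERDICT (by name: the statement is the Claim_ definition above) =====
theorem timsort_drag_run_lengths_spec : Claim_equal_timsort_drag_run_lengths := by
  intro n _
  unfold Spec_timsort_drag_run_lengths timsort_drag_run_lengths_alt
  rw [dragLoop_eq]
  simp [dragItemOut]
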